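-- pv_equiv track=rewrite | github.com/yokeTH/eng-com-prog-cu | grader/07/07_StrFile_31.py | count
-- ===== SOURCE A (Python) =====
-- def count(helix:str):
--     cnts = [0,0,0,0]
--     for i in helix:
--         i = i.upper()
--         if i == 'A':
--             cnts[0] += 1
--         elif i == 'T':
--             cnts[1] += 1
--         elif i == 'G':
--             cnts[2] += 1
--         elif i == 'C':
--             cnts[3] += 1
--         else:
--             return 'Invalid DNA'
--     return 'A={0[0]}, T={0[1]}, G={0[2]}, C={0[3]}'.format(cnts)
-- ===== SOURCE B (Python) =====
-- def count(helix: str):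
--     ups = [c.upper() for c in helix]
--     if any(u not in ('A', 'T', 'G', 'C') for u in ups):
--         return 'Invalid DNA'
--     return 'A={}, T={}, G={}, C={}'.format(
--         ups.count('A'), ups.count('T'), ups.count('G'), ups.count('C'))
-- ===== Notes on version B (the rewrite author's own statement) =====
-- stated objective: simpler
-- what changed: Replaces the fused count-and-early-return loop over a 4-slot list with a validation pass over per-char uppercases followed by four list.count scans.
import Mathlib
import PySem

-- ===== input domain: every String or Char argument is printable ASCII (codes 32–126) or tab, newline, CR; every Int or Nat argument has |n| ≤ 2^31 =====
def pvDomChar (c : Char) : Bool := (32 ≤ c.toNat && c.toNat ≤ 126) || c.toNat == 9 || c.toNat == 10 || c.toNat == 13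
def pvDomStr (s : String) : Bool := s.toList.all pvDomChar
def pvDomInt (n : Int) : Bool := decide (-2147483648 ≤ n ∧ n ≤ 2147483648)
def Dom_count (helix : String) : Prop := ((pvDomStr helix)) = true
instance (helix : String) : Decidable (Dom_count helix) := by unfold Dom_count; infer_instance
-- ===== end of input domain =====

-- B replaces A's fused count-and-early-return loop with a validation pass plus four count scans (objective: simpler).

-- ===== PORT A =====
-- A's loop: a 4-slot counter list, per-char uppercase, branch chain with early return.
def countLoop : List Char → List Int → String
  | [], cnts =>
      "A=" ++ PySem.Int.toStr (cnts.getD 0 0) ++ ", T=" ++ PySem.Int.toStr (cnts.getD 1 0) ++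
      ", G=" ++ PySem.Int.toStr (cnts.getD 2 0) ++ ", C=" ++ PySem.Int.toStr (cnts.getD 3 0)
  | ch :: rest, cnts =>
      let u := PySem.Chars.upperChar ch   -- i.upper() on one char; exact on the ASCII domain
      if u = 'A' then countLoop rest (cnts.set 0 (cnts.getD 0 0 + 1))
      else if u = 'T' then countLoop rest (cnts.set 1 (cnts.getD 1 0 + 1))
      else if u = 'G' then countLoop rest (cnts.set 2 (cnts.getD 2 0 + 1))
      else if u = 'C' then countLoop rest (cnts.set 3 (cnts.getD 3 0 + 1))
      else "Invalid DNA"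

def count (helix : String) : String := countLoop helix.toList [0, 0, 0, 0]

-- ===== PORT B =====
def count_alt (helix : String) : String :=
  let ups := helix.toList.map PySem.Chars.upperChar
  if ups.any (fun u => !(u ∈ ['A', 'T', 'G', 'C'])) then "Invalid DNA"
  else
    "A=" ++ PySem.Int.toStr (PySem.List.count ups 'A') ++
    ", T=" ++ PySem.Int.toStr (PySem.List.count ups 'T') ++
    ", G=" ++ PySem.Int.toStr (PySem.List.count ups 'G') ++
    ", C=" ++ PySem.Int.toStr (PySem.List.count ups 'C')

-- ===== PRECONDITION & SPEC =====
def Spec_count (helix : String) (out : String) : Prop := out = count_alt helix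
instance (helix : String) (out : String) : Decidable (Spec_count helix out) := by unfold Spec_count; infer_instance

-- ===== CLAIM (what is proved, stated in full; the proofs are below) =====
def Claim_equal_count : Prop := ∀ (helix : String), Dom_count helix → Spec_count helix (count helix)

-- ===== LEMMAS AND PROOFS =====

theorem countLoop_eq (l : List Char) : ∀ (a t g c : Int),
    countLoop l [a, t, g, c] =
      if l.any (fun ch => !(PySem.Chars.upperChar ch ∈ ['A', 'T', 'G', 'C'])) then "Invalid DNA"
      else
        "A=" ++ PySem.Int.toStr (a + (PySem.List.count (l.map PySem.Chars.upperChar) 'A' : Int)) ++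
        ", T=" ++ PySem.Int.toStr (t + (PySem.List.count (l.map PySem.Chars.upperChar) 'T' : Int)) ++
        ", G=" ++ PySem.Int.toStr (g + (PySem.List.count (l.map PySem.Chars.upperChar) 'G' : Int)) ++
        ", C=" ++ PySem.Int.toStr (c + (PySem.List.count (l.map PySem.Chars.upperChar) 'C' : Int)) := by
  induction l with
  | nil => intro a t g c; simp [countLoop, PySem.List.count]
  | cons ch rest ih =>
      intro a t g c
      simp only [countLoop, List.any_cons, List.map_cons, PySem.List.count, List.count_cons]
      by_cases hA : PySem.Chars.upperChar ch = 'A'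
      · simp [hA, ih]; ring_nf
      · by_cases hT : PySem.Chars.upperChar ch = 'T'
        · simp [hT, ih]; ring_nf
        · by_cases hG : PySem.Chars.upperChar ch = 'G'
          · simp [hG, ih]; ring_nf
          · by_cases hC : PySem.Chars.upperChar ch = 'C'
            · simp [hC, ih]; ring_nf
            · simp [hA, hT, hG, hC]

-- ===== VERDICT (by name: the statement is the Claim_ definition above) =====
theorem count_spec : Claim_equal_count := by
  intro helix _
  unfold Spec_count count count_alt
  rw [countLoop_eq]
  simp [List.any_map, Function.comp, PySem.List.count]
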